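-- pv_equiv track=rewrite | github.com/osu-kbs-capstone-sp2026-brew/LeVision | vision/possession_utils.py | apply_forward_fill
-- ===== SOURCE A (Python) =====
-- def apply_forward_fill(
--     filtered: dict[int, str | None],
--     max_fill: int = 4,
-- ) -> dict[int, str | None]:
--     """Hold the last valid jersey assignment for up to *max_fill* video seconds.
--
--     Bridges: ball in flight during a pass, catching delay, brief occlusion.
--     Reverts to None once the gap exceeds *max_fill* seconds (loose ball,
--     rebound scramble, dead ball).
--     """
--     secs = sorted(filtered.keys())
--     result: dict[int, str | None] = {}
--
--     last_jersey: str | None = None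
--     last_valid_sec: int = -9999
--
--     for sec in secs:
--         jersey = filtered[sec]
--         if jersey is not None:
--             last_jersey = jersey
--             last_valid_sec = sec
--             result[sec] = jersey
--         elif last_jersey is not None and (sec - last_valid_sec) <= max_fill:
--             result[sec] = last_jersey
--         else:
--             last_jersey = None   # gap too large — reset
--             result[sec] = None
--
--     return result
-- ===== SOURCE B (Python) =====
-- def apply_forward_fill(
--     filtered: dict[int, str | None],
--     max_fill: int = 4,
-- ) -> dict[int, str | None]:
--     """Segment-based fill: walk the time-sorted items; each valid assignment
--     anchors a run, and an inner loop consumes the following None seconds while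
--     they stay within max_fill of the anchor."""
--     items = sorted(filtered.items(), key=lambda kv: kv[0])
--     result: dict[int, str | None] = {}
--     i = 0
--     n = len(items)
--     while i < n:
--         sec, jersey = items[i]
--         i += 1
--         if jersey is None:
--             result[sec] = None
--         else:
--             result[sec] = jersey
--             while i < n and items[i][1] is None and items[i][0] - sec <= max_fill:
--                 result[items[i][0]] = jersey
--                 i += 1
--     return result
-- ===== Notes on version B (the rewrite author's own statement) =====
-- stated objective: alternative
-- what changed: Replaces A's single scan carrying (last_jersey, last_valid_sec) state across every element by a stateless segment decomposition: an outer loop over sorted items where each valid assignment anchors an inner loop that consumes the following in-gap None seconds.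
import Mathlib
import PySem

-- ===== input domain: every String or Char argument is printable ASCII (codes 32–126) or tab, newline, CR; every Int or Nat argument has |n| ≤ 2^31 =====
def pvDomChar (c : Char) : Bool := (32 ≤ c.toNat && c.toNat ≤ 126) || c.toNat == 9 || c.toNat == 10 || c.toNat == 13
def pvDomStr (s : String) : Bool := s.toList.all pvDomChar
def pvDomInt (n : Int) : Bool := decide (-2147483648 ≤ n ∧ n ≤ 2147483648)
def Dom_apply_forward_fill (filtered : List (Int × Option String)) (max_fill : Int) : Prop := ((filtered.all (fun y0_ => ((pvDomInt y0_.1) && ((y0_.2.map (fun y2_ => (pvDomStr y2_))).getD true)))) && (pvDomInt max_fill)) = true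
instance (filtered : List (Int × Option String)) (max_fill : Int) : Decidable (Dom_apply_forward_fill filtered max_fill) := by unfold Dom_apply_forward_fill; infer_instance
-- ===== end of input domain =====

-- B replaces A's stateful single scan by a stateless segment decomposition (anchor + inner span loop); same cost, proved equal on all inputs.


-- ===== PORT A =====
-- one step of A's for-loop: state = (result dict, last_jersey, last_valid_sec)
def pvStepA (d : PySem.Dict Int (Option String)) (max_fill : Int)
    (st : PySem.Dict Int (Option String) × Option String × Int) (sec : Int) :
    PySem.Dict Int (Option String) × Option String × Int :=
  match d.getD sec none with
  | some j => (st.1.insert sec (some j), some j, sec)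
  | none =>
    match st.2.1 with
    | some lj =>
        if sec - st.2.2 ≤ max_fill then (st.1.insert sec (some lj), some lj, st.2.2)
        else (st.1.insert sec none, none, st.2.2)
    | none => (st.1.insert sec none, none, st.2.2)

def apply_forward_fill (filtered : List (Int × Option String)) (max_fill : Int) : List (Int × Option String) :=
  let d := PySem.Dict.ofList filtered
  let secs := PySem.List.sorted d.keys (fun x => x) false
  (secs.foldl (pvStepA d max_fill) (PySem.Dict.empty, none, -9999)).1.items

-- ===== PORT B =====
-- inner while loop of Source B: consume leading None seconds within max_fill of the
-- anchor sec, filling them with jersey j; returns (filled span, remaining items)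
def pvSpan (sec : Int) (j : String) (max_fill : Int) :
    List (Int × Option String) → List (Int × Option String) × List (Int × Option String)
  | [] => ([], [])
  | (s, none) :: rest =>
      if s - sec ≤ max_fill then
        let p := pvSpan sec j max_fill rest
        ((s, some j) :: p.1, p.2)
      else ([], (s, none) :: rest)
  | (s, some v) :: rest => ([], (s, some v) :: rest)

theorem pvSpan_len (sec : Int) (j : String) (max_fill : Int) :
    ∀ l : List (Int × Option String), (pvSpan sec j max_fill l).2.length ≤ l.length := by
  intro l
  induction l with
  | nil => simp [pvSpan]
  | cons h t ih =>
    obtain ⟨s, v⟩ := h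
    cases v with
    | none =>
      simp only [pvSpan]
      split
      · simpa using Nat.le_succ_of_le ih
      · simp
    | some w => simp [pvSpan]

-- outer while loop of Source B over the remaining sorted items
def pvFill (max_fill : Int) : List (Int × Option String) → List (Int × Option String)
  | [] => []
  | (s, none) :: rest => (s, none) :: pvFill max_fill rest
  | (s, some j) :: rest =>
      (s, some j) :: ((pvSpan s j max_fill rest).1 ++ pvFill max_fill (pvSpan s j max_fill rest).2)
termination_by l => l.length
decreasing_by
  all_goals simp only [List.length_cons]
  all_goals first
    | omega
    | (have := pvSpan_len s j max_fill rest; omega)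

def apply_forward_fill_alt (filtered : List (Int × Option String)) (max_fill : Int) : List (Int × Option String) :=
  pvFill max_fill (PySem.List.sorted (PySem.Dict.ofList filtered).items (fun p => p.1) false)

-- ===== PRECONDITION & SPEC =====
def Spec_apply_forward_fill (filtered : List (Int × Option String)) (max_fill : Int) (out : List (Int × Option String)) : Prop := out = apply_forward_fill_alt filtered max_fill
instance (filtered : List (Int × Option String)) (max_fill : Int) (out : List (Int × Option String)) : Decidable (Spec_apply_forward_fill filtered max_fill out) := by unfold Spec_apply_forward_fill; infer_instance

-- ===== CLAIM (what is proved, stated in full; the proofs are below) =====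
def Claim_equal_apply_forward_fill : Prop := ∀ (filtered : List (Int × Option String)) (max_fill : Int), Dom_apply_forward_fill filtered max_fill → Spec_apply_forward_fill filtered max_fill (apply_forward_fill filtered max_fill)

-- ===== LEMMAS AND PROOFS =====

-- A's loop step re-expressed on the sorted (sec, jersey) pairs themselves
def pvStepP (mf : Int)
    (st : PySem.Dict Int (Option String) × Option String × Int) (p : Int × Option String) :
    PySem.Dict Int (Option String) × Option String × Int :=
  match p.2 with
  | some j => (st.1.insert p.1 (some j), some j, p.1)
  | none =>
    match st.2.1 with
    | some lj =>
        if p.1 - st.2.2 ≤ mf then (st.1.insert p.1 (some lj), some lj, st.2.2)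
        else (st.1.insert p.1 none, none, st.2.2)
    | none => (st.1.insert p.1 none, none, st.2.2)

-- main invariant lemma: running A's loop (as pvStepP) over a strictly
-- key-increasing item list appends exactly B's segment output to the result
theorem pv_main (mf : Int) :
    ∀ n (L : List (Int × Option String)), L.length ≤ n →
      L.Pairwise (fun a b => a.1 < b.1) →
      (∀ res lv, (∀ p ∈ L, res.contains p.1 = false) →
        (L.foldl (pvStepP mf) (res, none, lv)).1.items = res.items ++ pvFill mf L)
      ∧
      (∀ res sec j, (∀ p ∈ L, res.contains p.1 = false) → (∀ p ∈ L, sec < p.1) →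
        (L.foldl (pvStepP mf) (res, some j, sec)).1.items
          = res.items ++ ((pvSpan sec j mf L).1 ++ pvFill mf (pvSpan sec j mf L).2)) := by
  intro n
  induction n with
  | zero =>
    intro L hlen _
    have hL : L = [] := List.eq_nil_of_length_eq_zero (Nat.le_zero.mp hlen)
    subst hL
    exact ⟨fun res lv _ => by simp [pvFill], fun res sec j _ _ => by simp [pvSpan, pvFill]⟩
  | succ n ih =>
    intro L hlen hpw
    cases L with
    | nil =>
      exact ⟨fun res lv _ => by simp [pvFill], fun res sec j _ _ => by simp [pvSpan, pvFill]⟩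
    | cons hd t =>
      obtain ⟨s, v⟩ := hd
      have hpwt : t.Pairwise (fun a b => a.1 < b.1) := hpw.of_cons
      have hslt : ∀ p ∈ t, s < p.1 := fun p hp => List.rel_of_pairwise_cons hpw hp
      have hlt : t.length ≤ n := by simpa using Nat.succ_le_succ_iff.mp (by simpa using hlen)
      have IH := ih t hlt hpwt
      have fresh' : ∀ (res : PySem.Dict Int (Option String)) (w : Option String),
          (∀ p ∈ (s, v) :: t, res.contains p.1 = false) →
          ∀ p ∈ t, (res.insert s w).contains p.1 = false := by
        intro res w hfresh p hp
        rw [PySem.Dict.contains_insert]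
        have hne : p.1 ≠ s := by have := hslt p hp; omega
        simp [hne, hfresh p (List.mem_cons_of_mem _ hp)]
      constructor
      · intro res lv hfresh
        have hres : res.contains s = false := hfresh (s, v) (List.mem_cons_self ..)
        cases v with
        | none =>
          simp only [List.foldl_cons, pvStepP]
          rw [IH.1 (res.insert s none) lv (fresh' res none hfresh),
              PySem.Dict.items_insert_of_not_contains res none hres]
          simp [pvFill]
        | some j =>
          simp only [List.foldl_cons, pvStepP]
          rw [IH.2 (res.insert s (some j)) s j (fresh' res (some j) hfresh) hslt,
              PySem.Dict.items_insert_of_not_contains res (some j) hres]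
          simp [pvFill]
      · intro res sec j hfresh hsec
        have hres : res.contains s = false := hfresh (s, v) (List.mem_cons_self ..)
        cases v with
        | some j' =>
          simp only [List.foldl_cons, pvStepP]
          rw [IH.2 (res.insert s (some j')) s j' (fresh' res (some j') hfresh) hslt,
              PySem.Dict.items_insert_of_not_contains res (some j') hres]
          simp [pvSpan, pvFill]
        | none =>
          by_cases hgap : s - sec ≤ mf
          · simp only [List.foldl_cons, pvStepP]
            rw [if_pos hgap]
            rw [IH.2 (res.insert s (some j)) sec j (fresh' res (some j) hfresh)
                  (fun p hp => hsec p (List.mem_cons_of_mem _ hp)),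
                PySem.Dict.items_insert_of_not_contains res (some j) hres]
            simp [pvSpan, hgap]
          · simp only [List.foldl_cons, pvStepP]
            rw [if_neg hgap]
            rw [IH.1 (res.insert s none) sec (fresh' res none hfresh),
                PySem.Dict.items_insert_of_not_contains res none hres]
            simp [pvSpan, hgap, pvFill]

-- ===== VERDICT (by name: the statement is the Claim_ definition above) =====
theorem apply_forward_fill_spec : Claim_equal_apply_forward_fill := by
  intro filtered mf _
  unfold Spec_apply_forward_fill apply_forward_fill apply_forward_fill_alt
  set d := PySem.Dict.ofList filtered with hd
  set L := PySem.List.sorted d.items (fun p => p.1) false with hL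
  have hnd : d.keys.Nodup := PySem.Dict.nodup_keys_ofList filtered
  have hperm : L.Perm d.items := PySem.List.sorted_perm d.items (fun p => p.1) false
  have hkeysperm : (L.map (fun p => p.1)).Perm d.keys := hperm.map _
  have hndL : (L.map (fun p => p.1)).Nodup := hkeysperm.nodup_iff.mpr hnd
  have hle : L.Pairwise (fun a b => a.1 ≤ b.1) :=
    PySem.List.sorted_pairwise d.items (fun p => p.1)
  have hpw : L.Pairwise (fun a b => a.1 < b.1) := by
    have hne : L.Pairwise (fun a b => a.1 ≠ b.1) := List.pairwise_map.mp hndL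
    exact (hle.and hne).imp (fun h => lt_of_le_of_ne h.1 h.2)
  have hkeys : PySem.List.sorted d.keys (fun x => x) false = L.map (fun p => p.1) :=
    PySem.List.sorted_eq_of_perm_of_pairwise_lt d.keys (L.map (fun p => p.1)) (fun x => x)
      hkeysperm (List.pairwise_map.mpr hpw)
  have hget : ∀ p ∈ L, d.getD p.1 none = p.2 := by
    intro p hp
    obtain ⟨k, v⟩ := p
    exact PySem.Dict.getD_of_mem_items d (hperm.subset hp) hnd none
  have hfold : List.foldl (pvStepA d mf) (PySem.Dict.empty, none, -9999) (L.map (fun p => p.1))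
      = List.foldl (pvStepP mf) (PySem.Dict.empty, none, -9999) L := by
    rw [List.foldl_map]
    exact PySem.List.foldl_congr_mem L _ _ _ (by
      intro acc p hp
      simp only [pvStepA, pvStepP, hget p hp])
  have hmain := (pv_main mf L.length L le_rfl hpw).1 PySem.Dict.empty (-9999)
    (fun p _ => PySem.Dict.contains_empty p.1)
  simp only [hkeys, hfold]
  rw [hmain]
  simp [PySem.Dict.empty]
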